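-- pv_equiv track=rewrite | github.com/rockobonaparte/cloaca | CloacaCodeTests/amazon-orders.py | prioritizedOrders
-- ===== SOURCE A (Python) =====
-- def prioritizedOrders(numOrders, orderList):
--     # Will assume orderList should not be mutated, since a new list is expected
--     # as output.
--
--     # Split between prime and non-prime orders
--     # Appending non-prime orders will preserve their original order
--     prime = []
--     non_prime = []
--     for order in orderList:
--         first_space = order.find(" ")
--         # We are only test the first character of the metadata. Prime
--         # orders must only use alphabet characters, and non-prime orders
--         # must only use numeric characters
--         if order[first_space + 1:][0].isdigit():
--             non_prime.append(order)
--         else: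
--             prime.append(order)
--
--     # Helper to sorted that will search first by the metadata then by the
--     # lexagraphic ID. We can do this by using [metadata][Id] as the key
--     # First identifier is only used when there's a tie with the previous metadata
--     def metadata_then_id_key(x):
--         first_space = x.find(" ")
--         return x[first_space + 1:] + x[:first_space]
--
--     return sorted(prime, key=metadata_then_id_key) + non_prime
-- ===== SOURCE B (Python) =====
-- def prioritizedOrders(numOrders, orderList):
--     # One stable sorted() pass over the whole list: prime orders get key
--     # (0, metadata+id), non-prime get (1, "") so stability preserves their
--     # original order after all prime orders.
--     def sort_key(order):
--         first_space = order.find(" ")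
--         rest = order[first_space + 1:]
--         if rest[0].isdigit():
--             return (1, "")
--         return (0, rest + order[:first_space])
--     return sorted(orderList, key=sort_key)
-- ===== Notes on version B (the rewrite author's own statement) =====
-- stated objective: simpler
-- what changed: Replaced A's partition into prime/non-prime lists followed by sorting the prime half and concatenating with a single stable sorted() call over the whole list under a tuple key ((0, metadata+id) for prime, (1, "") for non-prime), relying on sort stability to keep non-prime orders in original order after all prime ones.
import Mathlib
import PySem

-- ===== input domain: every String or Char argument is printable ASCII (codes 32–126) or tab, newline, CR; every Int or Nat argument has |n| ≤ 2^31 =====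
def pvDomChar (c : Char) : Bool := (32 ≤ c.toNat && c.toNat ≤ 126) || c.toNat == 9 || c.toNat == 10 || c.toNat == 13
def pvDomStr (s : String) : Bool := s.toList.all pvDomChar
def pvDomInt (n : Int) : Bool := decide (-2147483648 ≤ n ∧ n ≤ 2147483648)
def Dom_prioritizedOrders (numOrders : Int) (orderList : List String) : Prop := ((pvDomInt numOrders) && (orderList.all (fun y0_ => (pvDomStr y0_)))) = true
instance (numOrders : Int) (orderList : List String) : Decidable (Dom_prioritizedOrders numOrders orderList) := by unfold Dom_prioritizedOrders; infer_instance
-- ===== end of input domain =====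

-- B replaces A's partition-into-two-lists + sort-one-half + concatenate with a single
-- stable sorted() pass over the whole list under a tuple key (objective: simpler).

-- ===== PORT A =====
-- order[first_space+1:] with first_space = order.find(" ") — used by both Pythons verbatim
def pvRest (x : String) : List Char :=
  PySem.List.slice x.toList (some (PySem.Chars.find x.toList [' '] + 1)) none

-- order[first_space+1:][0].isdigit(); Python raises IndexError on the [] case (excluded by Pre_)
def pvIsNonPrime (x : String) : Bool :=
  match (pvRest x).head? with
  | some c => PySem.Chars.isdigit c
  | none => false

-- A's helper metadata_then_id_key: x[first_space+1:] + x[:first_space]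
def pvKey (x : String) : String :=
  String.mk (pvRest x ++ PySem.List.slice x.toList none (some (PySem.Chars.find x.toList [' '])))

def prioritizedOrders (numOrders : Int) (orderList : List String) : List String :=
  let pn := orderList.foldl
    (fun acc order =>
      if pvIsNonPrime order then (acc.1, acc.2 ++ [order]) else (acc.1 ++ [order], acc.2))
    ([], [])
  PySem.List.sorted pn.1 pvKey ++ pn.2

-- ===== PORT B =====
-- B's sort_key: (1, "") for non-prime, (0, rest + order[:first_space]) for prime;
-- the [] case of rest is where Python raises IndexError (excluded by Pre_)
def pvAltKey (x : String) : Int × String :=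
  match (pvRest x).head? with
  | some c =>
      if PySem.Chars.isdigit c then (1, "")
      else (0, String.mk (pvRest x ++ PySem.List.slice x.toList none (some (PySem.Chars.find x.toList [' ']))))
  | none => (0, "")

def prioritizedOrders_alt (numOrders : Int) (orderList : List String) : List String :=
  PySem.List.sorted2 orderList (fun x => (pvAltKey x).1) (fun x => (pvAltKey x).2)

-- ===== PRECONDITION & SPEC =====
-- Pre_ excludes exactly the inputs where some order has no character after its first
-- space (or is empty with no space): there both Pythons raise IndexError on rest[0].
def Pre_prioritizedOrders (numOrders : Int) (orderList : List String) : Prop :=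
  ∀ o ∈ orderList, PySem.Str.find o " " + 1 < (o.toList.length : Int)
instance (numOrders : Int) (orderList : List String) : Decidable (Pre_prioritizedOrders numOrders orderList) := by unfold Pre_prioritizedOrders; infer_instance

def pvWitness_prioritizedOrders : Int × List String := (4, ["zz bbq", "aa bb", "x 12", "aa bb cc"])

def Spec_prioritizedOrders (numOrders : Int) (orderList : List String) (out : List String) : Prop := out = prioritizedOrders_alt numOrders orderList
instance (numOrders : Int) (orderList : List String) (out : List String) : Decidable (Spec_prioritizedOrders numOrders orderList out) := by unfold Spec_prioritizedOrders; infer_instance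

-- ===== CLAIM (what is proved, stated in full; the proofs are below) =====
def Claim_equal_prioritizedOrders : Prop := ∀ (numOrders : Int) (orderList : List String), Dom_prioritizedOrders numOrders orderList → Pre_prioritizedOrders numOrders orderList → Spec_prioritizedOrders numOrders orderList (prioritizedOrders numOrders orderList)

-- ===== LEMMAS AND PROOFS =====

-- B's comparison (sorted2's tuple-lexicographic 'before') and A's (string key 'before')
def pvBB (a b : String) : Bool :=
  decide ((pvAltKey a).1 < (pvAltKey b).1) ||
    (!decide ((pvAltKey b).1 < (pvAltKey a).1) && decide ((pvAltKey a).2 < (pvAltKey b).2))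
def pvBA (a b : String) : Bool := decide (pvKey a < pvKey b)

-- On inputs admitted by Pre_, B's key is (1,"") on non-prime orders and (0, A's key) on prime ones
def pvGood (x : String) : Prop :=
  pvAltKey x = (if pvIsNonPrime x then ((1:Int), "") else ((0:Int), pvKey x))

lemma pvGood_of_pre (x : String) (h : PySem.Str.find x " " + 1 < (x.toList.length : Int)) :
    pvGood x := by
  have h0 : -1 ≤ PySem.Chars.find x.toList [' '] := PySem.Chars.neg_one_le_find _ _
  have hfind : PySem.Str.find x " " = PySem.Chars.find x.toList [' '] := rfl
  rw [hfind] at h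
  have ha : PySem.List.clampIdx x.toList.length (PySem.Chars.find x.toList [' '] + 1)
      = (PySem.Chars.find x.toList [' '] + 1).toNat := by
    unfold PySem.List.clampIdx
    rw [if_neg (by omega)]
    omega
  have hrest : pvRest x = x.toList.drop (PySem.Chars.find x.toList [' '] + 1).toNat := by
    unfold pvRest
    simp only [PySem.List.slice, ha]
    exact List.take_of_length_le (by simp)
  have hne : pvRest x ≠ [] := by
    rw [hrest]
    simp only [ne_eq, List.drop_eq_nil_iff, not_le]
    omega
  obtain ⟨c, t, hct⟩ := List.exists_cons_of_ne_nil hne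
  unfold pvGood pvAltKey pvIsNonPrime pvKey
  rw [hct]
  by_cases hd : PySem.Chars.isdigit c
  · simp [hd]
  · simp [hd]

lemma insertBy_append_agree (x : String) (before before' : String → String → Bool)
    (l1 l2 : List String)
    (h2 : ∀ a ∈ l2, before x a = true)
    (h1 : ∀ a ∈ l1, before x a = before' x a) :
    PySem.List.insertBy before x (l1 ++ l2) = PySem.List.insertBy before' x l1 ++ l2 := by
  induction l1 with
  | nil =>
    cases l2 with
    | nil => simp [PySem.List.insertBy]
    | cons a t => simp [PySem.List.insertBy, h2 a (by simp)]
  | cons y ys ih =>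
    have hy := h1 y (by simp)
    by_cases hb : before' x y
    · simp [PySem.List.insertBy, hy, hb]
    · simp only [List.cons_append, PySem.List.insertBy, hy, hb, Bool.false_eq_true,
        if_false]
      rw [ih (fun a ha => h1 a (by simp [ha]))]

lemma main_fold (xs accP accN : List String)
    (hxs : ∀ x ∈ xs, pvGood x)
    (hP : ∀ a ∈ accP, pvGood a ∧ pvIsNonPrime a = false)
    (hN : ∀ a ∈ accN, pvGood a ∧ pvIsNonPrime a = true) :
    xs.foldl (fun acc x => PySem.List.insertBy pvBB x acc) (accP ++ accN)
      = (xs.filter (fun x => !pvIsNonPrime x)).foldl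
          (fun acc x => PySem.List.insertBy pvBA x acc) accP
        ++ accN ++ xs.filter (fun x => pvIsNonPrime x) := by
  induction xs generalizing accP accN with
  | nil => simp
  | cons x t ih =>
    have hGx : pvGood x := hxs x (by simp)
    by_cases hp : pvIsNonPrime x
    · -- non-prime: x compares ≥ everything present, so it is appended at the end
      have hkx : pvAltKey x = ((1:Int), "") := by rw [hGx, if_pos hp]
      have hins : PySem.List.insertBy pvBB x (accP ++ accN) = accP ++ (accN ++ [x]) := by
        rw [PySem.List.insertBy_of_forall_not_before]
        · simp
        · intro a ha
          rcases List.mem_append.mp ha with haP | haN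
          · obtain ⟨hga, hpa⟩ := hP a haP
            have hka : pvAltKey a = ((0:Int), pvKey a) := by rw [hga, hpa]; simp
            simp [pvBB, hkx, hka]
          · obtain ⟨hga, hpa⟩ := hN a haN
            have hka : pvAltKey a = ((1:Int), "") := by rw [hga, if_pos hpa]
            simp [pvBB, hkx, hka]
      simp only [List.foldl_cons, hins]
      rw [ih accP (accN ++ [x]) (fun y hy => hxs y (by simp [hy])) hP
          (by intro a ha
              rcases List.mem_append.mp ha with h | h
              · exact hN a h
              · simp at h; subst h; exact ⟨hGx, hp⟩)]
      simp [hp, List.append_assoc]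
    · -- prime: x goes past all of accN's elements into accP, compared by A's key
      have hkx : pvAltKey x = ((0:Int), pvKey x) := by rw [hGx]; simp [hp]
      have hins : PySem.List.insertBy pvBB x (accP ++ accN)
          = PySem.List.insertBy pvBA x accP ++ accN := by
        apply insertBy_append_agree
        · intro a ha
          obtain ⟨hga, hpa⟩ := hN a ha
          have hka : pvAltKey a = ((1:Int), "") := by rw [hga, if_pos hpa]
          simp [pvBB, hkx, hka]
        · intro a ha
          obtain ⟨hga, hpa⟩ := hP a ha
          have hka : pvAltKey a = ((0:Int), pvKey a) := by rw [hga, hpa]; simp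
          simp [pvBB, pvBA, hkx, hka]
      simp only [List.foldl_cons, hins]
      rw [ih (PySem.List.insertBy pvBA x accP) accN (fun y hy => hxs y (by simp [hy]))
          (by intro a ha
              rcases (PySem.List.mem_insertBy _ _ _ _).mp ha with h | h
              · subst h; exact ⟨hGx, by simp [hp]⟩
              · exact hP a h)
          hN]
      simp [hp]

lemma partition_fold (xs : List String) :
    xs.foldl
      (fun acc order =>
        if pvIsNonPrime order then (acc.1, acc.2 ++ [order]) else (acc.1 ++ [order], acc.2))
      (([] : List String), ([] : List String))
      = (xs.filter (fun x => !pvIsNonPrime x), xs.filter (fun x => pvIsNonPrime x)) := by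
  have hfun : (fun (acc : List String × List String) order =>
        if pvIsNonPrime order then (acc.1, acc.2 ++ [order]) else (acc.1 ++ [order], acc.2))
      = (fun acc order =>
          (if (!pvIsNonPrime order) then acc.1 ++ [order] else acc.1,
           if pvIsNonPrime order then acc.2 ++ [order] else acc.2)) := by
    funext acc o
    by_cases h : pvIsNonPrime o <;> simp [h]
  rw [hfun,
    PySem.List.foldl_prod_mk (f := fun a o => if (!pvIsNonPrime o) then a ++ [o] else a)
      (g := fun a o => if pvIsNonPrime o then a ++ [o] else a)]
  rw [PySem.List.foldl_append_if_eq_filter, PySem.List.foldl_append_if_eq_filter]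
  simp

-- ===== VERDICT (by name: the statement is the Claim_ definition above) =====
theorem prioritizedOrders_spec : Claim_equal_prioritizedOrders := by
  intro numOrders orderList _hdom hpre
  unfold Spec_prioritizedOrders
  have hxs : ∀ x ∈ orderList, pvGood x := fun x hx => pvGood_of_pre x (hpre x hx)
  have hB : prioritizedOrders_alt numOrders orderList
      = orderList.foldl (fun acc x => PySem.List.insertBy pvBB x acc) [] := rfl
  have hA : prioritizedOrders numOrders orderList
      = (orderList.filter (fun x => !pvIsNonPrime x)).foldl
          (fun acc x => PySem.List.insertBy pvBA x acc) []
        ++ orderList.filter (fun x => pvIsNonPrime x) := by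
    unfold prioritizedOrders
    rw [partition_fold]
    show PySem.List.sorted (orderList.filter (fun x => !pvIsNonPrime x)) pvKey
        ++ orderList.filter (fun x => pvIsNonPrime x) = _
    rw [PySem.List.sorted_eq_foldl_insertBy]
    rfl
  rw [hA, hB]
  have := main_fold orderList [] [] hxs (by simp) (by simp)
  simpa using this.symm
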